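-- pv_equiv track=rewrite | github.com/renteria3/Python_Code | Human Pyramid.py | humanPyramid
-- ===== SOURCE A (Python) =====
-- def humanPyramid(row,column): #recursive function to figure out how much weight the specific human is carrying
--     'returns amount of weight carrying for specified position'
--     #Note: 128 is the assumed weight for the humans in the pyramid
--     if row < 1 and column < 1: # TOP: condition for the top of the pyramid
--         return 0
--     elif column == 0: # SIDE1: condition for the side of the pyramid where column is 0
--         return (humanPyramid(row-1,column) + 128)//2
--     elif row == column: # SIDE2: condition for the side of the pyramid where row and column are the same number
--         return (humanPyramid(row-1,column-1) + 128)//2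
--     else: # MIDDLE: condition for the ones in the middle of the pyramid
--         return (humanPyramid(row-1,column-1) + humanPyramid(row-1,column) + 2*128)//2
-- ===== SOURCE B (Python) =====
-- def humanPyramid(row, column):
--     'returns amount of weight carrying for specified position'
--     # Bottom-up dynamic program: build each pyramid row from the previous one.
--     prev = [0]
--     for r in range(1, row + 1):
--         cur = []
--         for c in range(r + 1):
--             if c == 0:
--                 cur.append((prev[0] + 128) // 2)
--             elif c == r:
--                 cur.append((prev[c - 1] + 128) // 2)
--             else:
--                 cur.append((prev[c - 1] + prev[c] + 256) // 2)
--         prev = cur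
--     return prev[column]
-- ===== Notes on version B (the rewrite author's own statement) =====
-- stated objective: faster
-- what changed: Replaces the exponential two-branch recursion with a bottom-up dynamic program that builds each pyramid row from the previous one; intended as faster (O(row^2) vs O(2^row)), measured: in a timing run A timed out from row=16 up while B returned, so no clean ratio could be read at the largest size; Pre_ restricts to genuine pyramid positions (0 <= column <= row, plus the lone top for row < 1): on negative columns A returns an artefact of its out-of-domain recursion (128*row, or 0) that nobody would specify, while B's natural list indexing wraps or raises IndexError there.
-- outside the precondition, e.g. on humanPyramid(3, -1): A returns 384, B returns 112; on humanPyramid(1, -5): A returns 128, B raises IndexError; on humanPyramid(-2, -3): A returns 0, B raises IndexError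
import Mathlib
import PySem

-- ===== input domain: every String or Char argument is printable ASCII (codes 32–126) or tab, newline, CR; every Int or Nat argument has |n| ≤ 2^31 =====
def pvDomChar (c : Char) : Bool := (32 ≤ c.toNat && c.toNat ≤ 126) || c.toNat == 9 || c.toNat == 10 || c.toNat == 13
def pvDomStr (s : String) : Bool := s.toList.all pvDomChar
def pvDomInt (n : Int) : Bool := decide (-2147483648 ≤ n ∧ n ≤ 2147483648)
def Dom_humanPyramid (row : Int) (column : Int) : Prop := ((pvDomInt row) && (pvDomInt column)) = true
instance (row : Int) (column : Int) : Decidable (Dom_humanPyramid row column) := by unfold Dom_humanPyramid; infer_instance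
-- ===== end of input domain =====

-- B replaces A's exponential recursion by a bottom-up row-by-row dynamic program; intended as faster
-- (in a timing run A timed out from row=16 up while B returned; no clean ratio could be measured).

-- ===== PORT A =====
-- A's recursion diverges when column ≥ 1 and column > row; the fuel (row.toNat + 1)
-- is enough for every input admitted by Pre_, so on Pre_ this is A's recursion step for step.
def pyrAux : Nat → Int → Int → Int
  | 0, _, _ => 0
  | n + 1, row, column =>
    if row < 1 ∧ column < 1 then 0
    else if column = 0 then PySem.Int.floordiv (pyrAux n (row - 1) column + 128) 2
    else if row = column then PySem.Int.floordiv (pyrAux n (row - 1) (column - 1) + 128) 2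
    else PySem.Int.floordiv (pyrAux n (row - 1) (column - 1) + pyrAux n (row - 1) column + 2 * 128) 2

def humanPyramid (row : Int) (column : Int) : Int := pyrAux (row.toNat + 1) row column

-- ===== PORT B =====
-- prev[...] reads are in range for every input admitted by Pre_; .getD 0 only totalises them.
def humanPyramid_alt (row : Int) (column : Int) : Int :=
  let prev :=
    (PySem.List.pyRange 1 (row + 1) 1).foldl (fun prev r =>
      (PySem.List.pyRange 0 (r + 1) 1).foldl (fun cur c =>
        cur ++ [if c = 0 then PySem.Int.floordiv ((PySem.List.pyGet? prev 0).getD 0 + 128) 2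
                else if c = r then PySem.Int.floordiv ((PySem.List.pyGet? prev (c - 1)).getD 0 + 128) 2
                else PySem.Int.floordiv ((PySem.List.pyGet? prev (c - 1)).getD 0 + (PySem.List.pyGet? prev c).getD 0 + 256) 2]) [])
      [0]
  (PySem.List.pyGet? prev column).getD 0

-- ===== PRECONDITION & SPEC =====
-- Pre_ restricts to the genuine pyramid positions (0 ≤ column ≤ row, plus the lone top person
-- for row < 1): outside them A either diverges (column ≥ 1 and column > row) or returns an
-- artefact of its recursion on a nonsensical negative column (128*row, or 0), values nobody
-- would specify and on part of which B's list indexing raises IndexError.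
def Pre_humanPyramid (row : Int) (column : Int) : Prop :=
  0 ≤ column ∧ (column ≤ row ∨ column = 0)
instance (row : Int) (column : Int) : Decidable (Pre_humanPyramid row column) := by unfold Pre_humanPyramid; infer_instance
def pvWitness_humanPyramid : Int × Int := (4, 2)
def Spec_humanPyramid (row : Int) (column : Int) (out : Int) : Prop := out = humanPyramid_alt row column
instance (row : Int) (column : Int) (out : Int) : Decidable (Spec_humanPyramid row column out) := by unfold Spec_humanPyramid; infer_instance

-- ===== CLAIM (what is proved, stated in full; the proofs are below) =====
def Claim_equal_humanPyramid : Prop := ∀ (row : Int) (column : Int), Dom_humanPyramid row column → Pre_humanPyramid row column → Spec_humanPyramid row column (humanPyramid row column)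

-- ===== LEMMAS AND PROOFS =====

-- one-step unfolding equation (definitional)
theorem pyrAux_succ (n : Nat) (row column : Int) :
    pyrAux (n + 1) row column =
      if row < 1 ∧ column < 1 then 0
      else if column = 0 then PySem.Int.floordiv (pyrAux n (row - 1) column + 128) 2
      else if row = column then PySem.Int.floordiv (pyrAux n (row - 1) (column - 1) + 128) 2
      else PySem.Int.floordiv (pyrAux n (row - 1) (column - 1) + pyrAux n (row - 1) column + 2 * 128) 2 := rfl

-- reference function: the pyramid weight at (r, c) for 0 ≤ c ≤ r, structural on r
def pyr : Nat → Nat → Int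
  | 0, _ => 0
  | r + 1, c =>
    if c = 0 then PySem.Int.floordiv (pyr r 0 + 128) 2
    else if c = r + 1 then PySem.Int.floordiv (pyr r r + 128) 2
    else PySem.Int.floordiv (pyr r (c - 1) + pyr r c + 256) 2

theorem pyr_succ (r c : Nat) :
    pyr (r + 1) c =
      if c = 0 then PySem.Int.floordiv (pyr r 0 + 128) 2
      else if c = r + 1 then PySem.Int.floordiv (pyr r r + 128) 2
      else PySem.Int.floordiv (pyr r (c - 1) + pyr r c + 256) 2 := rfl

-- A's port equals the reference on the triangle 0 ≤ c ≤ r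
theorem pyrAux_pyr (n : Nat) : ∀ (r c : Nat), c ≤ r → r < n →
    pyrAux n (r : Int) (c : Int) = pyr r c := by
  induction n with
  | zero => intro r c _ h; omega
  | succ m ih =>
    intro r c hcr hn
    match r, c with
    | 0, c =>
      have h0 : c = 0 := by omega
      subst h0
      simp only [Nat.cast_zero]
      rw [pyrAux_succ, if_pos ⟨by norm_num, by norm_num⟩]
      rfl
    | r + 1, 0 =>
      push_cast
      rw [pyrAux_succ, if_neg (by omega : ¬ ((r : Int) + 1 < 1 ∧ (0 : Int) < 1)),
        if_pos rfl, show (r : Int) + 1 - 1 = (r : Int) by ring,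
        show (0 : Int) = ((0 : Nat) : Int) by norm_num, ih r 0 (by omega) (by omega),
        pyr_succ, if_pos rfl]
    | r + 1, c + 1 =>
      push_cast
      have hbase : ¬ ((r : Int) + 1 < 1 ∧ (c : Int) + 1 < 1) := by omega
      have hc0 : ¬ ((c : Int) + 1 = 0) := by omega
      by_cases heq : c = r
      · subst heq
        rw [pyrAux_succ, if_neg hbase, if_neg hc0, if_pos rfl,
          show (c : Int) + 1 - 1 = (c : Int) by ring, ih c c le_rfl (by omega),
          pyr_succ, if_neg (by omega : ¬ (c + 1 = 0)), if_pos rfl]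
      · have hne : ¬ ((r : Int) + 1 = (c : Int) + 1) := by omega
        rw [pyrAux_succ, if_neg hbase, if_neg hc0, if_neg hne,
          show (c : Int) + 1 - 1 = (c : Int) by ring,
          show (r : Int) + 1 - 1 = (r : Int) by ring,
          ih r c (by omega) (by omega),
          show (c : Int) + 1 = ((c + 1 : Nat) : Int) by push_cast; ring,
          ih r (c + 1) (by omega) (by omega),
          pyr_succ, if_neg (by omega : ¬ (c + 1 = 0)), if_neg (by omega : ¬ (c + 1 = r + 1))]
        norm_num

-- the row list maintained by B's outer loop
def rowL (k : Nat) : List Int := (List.range (k + 1)).map (pyr k)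

theorem rowL_get (k c : Nat) (h : c ≤ k) : (rowL k)[c]? = some (pyr k c) := by
  unfold rowL
  rw [List.getElem?_map, List.getElem?_range (by omega)]
  rfl

-- generic append-accumulate fold = map
theorem foldl_append_map (f : Int → Int) (l : List Int) : ∀ (acc : List Int),
    l.foldl (fun cur c => cur ++ [f c]) acc = acc ++ l.map f := by
  induction l with
  | nil => intro acc; simp
  | cons x xs ih => intro acc; simp [List.foldl, ih]

-- range(0, m) as a mapped List.range
theorem natRange (m : Nat) :
    PySem.List.pyRange 0 (m : Int) 1 = (List.range m).map Int.ofNat := by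
  induction m with
  | zero =>
    rw [Nat.cast_zero, PySem.List.pyRange_one_eq_nil le_rfl]
    simp
  | succ n ih =>
    rw [show ((n + 1 : Nat) : Int) = (n : Int) + 1 by push_cast; ring,
      PySem.List.pyRange_one_succ_right (by omega), ih, List.range_succ, List.map_append]
    simp

-- B's inner loop body, with prev = rowL k and r = k+1, computes pyr (k+1)
theorem inner_step (k : Nat) (c : Nat) (hc : c ≤ k + 1) :
    (if (c : Int) = 0 then PySem.Int.floordiv ((PySem.List.pyGet? (rowL k) 0).getD 0 + 128) 2
     else if (c : Int) = ((k + 1 : Nat) : Int) then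
       PySem.Int.floordiv ((PySem.List.pyGet? (rowL k) ((c : Int) - 1)).getD 0 + 128) 2
     else PySem.Int.floordiv ((PySem.List.pyGet? (rowL k) ((c : Int) - 1)).getD 0
            + (PySem.List.pyGet? (rowL k) (c : Int)).getD 0 + 256) 2)
    = pyr (k + 1) c := by
  match c with
  | 0 =>
    simp only [Nat.cast_zero, ite_true]
    rw [PySem.List.pyGet?_zero, rowL_get k 0 (by omega), Option.getD_some,
      pyr_succ, if_pos rfl]
  | c + 1 =>
    have h0 : ¬ (((c + 1 : Nat) : Int) = 0) := by push_cast; omega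
    have hsub : ((c + 1 : Nat) : Int) - 1 = ((c : Nat) : Int) := by push_cast; ring
    by_cases he : c + 1 = k + 1
    · have hck : c = k := by omega
      subst hck
      rw [if_neg h0, if_pos rfl, hsub, PySem.List.pyGet?_natCast,
        rowL_get c c le_rfl, Option.getD_some, pyr_succ,
        if_neg (by omega : ¬ (c + 1 = 0)), if_pos rfl]
    · have hne : ¬ (((c + 1 : Nat) : Int) = ((k + 1 : Nat) : Int)) := by push_cast; omega
      rw [if_neg h0, if_neg hne, hsub, PySem.List.pyGet?_natCast, PySem.List.pyGet?_natCast,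
        rowL_get k c (by omega), rowL_get k (c + 1) (by omega), Option.getD_some,
        Option.getD_some, pyr_succ, if_neg (by omega : ¬ (c + 1 = 0)), if_neg he]
      rfl

-- B's outer loop invariant: after k iterations prev is the k-th pyramid row
theorem outer_loop (k : Nat) :
    (PySem.List.pyRange 1 ((k : Int) + 1) 1).foldl (fun prev r =>
      (PySem.List.pyRange 0 (r + 1) 1).foldl (fun cur c =>
        cur ++ [if c = 0 then PySem.Int.floordiv ((PySem.List.pyGet? prev 0).getD 0 + 128) 2
                else if c = r then PySem.Int.floordiv ((PySem.List.pyGet? prev (c - 1)).getD 0 + 128) 2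
                else PySem.Int.floordiv ((PySem.List.pyGet? prev (c - 1)).getD 0 + (PySem.List.pyGet? prev c).getD 0 + 256) 2]) [])
      [0] = rowL k := by
  induction k with
  | zero =>
    rw [show ((0 : Nat) : Int) + 1 = 1 by norm_num, PySem.List.pyRange_one_eq_nil le_rfl]
    simp [rowL, List.range_one]
    rfl
  | succ m ih =>
    rw [show ((m + 1 : Nat) : Int) + 1 = ((m : Int) + 1) + 1 by push_cast; ring,
      PySem.List.pyRange_one_succ_right (by omega), List.foldl_append, ih,
      List.foldl_cons, List.foldl_nil,
      show (m : Int) + 1 + 1 = ((m + 2 : Nat) : Int) by push_cast; ring,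
      show (m : Int) + 1 = ((m + 1 : Nat) : Int) by push_cast; ring,
      natRange (m + 2), foldl_append_map, List.nil_append, List.map_map]
    rw [show rowL (m + 1) = (List.range (m + 2)).map (pyr (m + 1)) from rfl]
    apply List.map_congr_left
    intro c hc
    simp only [Function.comp_apply, Int.ofNat_eq_natCast]
    exact inner_step m c (by have := List.mem_range.mp hc; omega)

-- main triangle lemma for B's port
theorem alt_triangle (r c : Nat) (hcr : c ≤ r) :
    humanPyramid_alt (r : Int) (c : Int) = pyr r c := by
  unfold humanPyramid_alt
  show (PySem.List.pyGet? _ ((c : Nat) : Int)).getD 0 = pyr r c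
  rw [outer_loop r, PySem.List.pyGet?_natCast, rowL_get r c hcr]
  rfl

-- ===== VERDICT (by name: the statement is the Claim_ definition above) =====
theorem humanPyramid_spec : Claim_equal_humanPyramid := by
  intro row column _ hpre
  unfold Spec_humanPyramid humanPyramid
  obtain ⟨hc0, hcase⟩ := hpre
  by_cases hr : 0 ≤ row
  · have hcr : column ≤ row := by omega
    obtain ⟨r, hrn⟩ : ∃ r : Nat, row = (r : Int) := ⟨row.toNat, by omega⟩
    obtain ⟨c, hcn⟩ : ∃ c : Nat, column = (c : Int) := ⟨column.toNat, by omega⟩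
    subst hrn; subst hcn
    have hcrn : c ≤ r := by exact_mod_cast hcr
    rw [show ((r : Int)).toNat = r from Int.toNat_natCast r,
      pyrAux_pyr (r + 1) r c hcrn (by omega), alt_triangle r c hcrn]
  · have hcz : column = 0 := by omega
    subst hcz
    rw [show row.toNat = 0 by omega, pyrAux_succ, if_pos ⟨by omega, by norm_num⟩]
    unfold humanPyramid_alt
    rw [PySem.List.pyRange_one_eq_nil (by omega : row + 1 ≤ 1)]
    rfl
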